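-- pv_equiv track=rewrite | github.com/KimMin17/algorithm_study | Baekjoon/11497.py | solve
-- ===== SOURCE A (Python) =====
-- def solve(n, l):
--     l.sort()
--     new_l = []
--
--     for i in range(0, n, 2):
--         new_l.append(l[i])
--     for i in reversed(range(1, n, 2)):
--         new_l.append(l[i])
--
--     max_diff = -1
--
--     for i in range(n):
--         max_diff = max(max_diff, abs(new_l[i] - new_l[(i+1)%n]))
--
--     return max_diff
-- ===== SOURCE B (Python) =====
-- def solve(n, l):
--     # Simpler: after sorting, the zigzag's max circular difference equals the
--     # largest distance-2 gap in the sorted order (seeded with l[1]-l[0]).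
--     l.sort()
--     if n <= 0:
--         return -1
--     if n == 1:
--         return 0
--     best = l[1] - l[0]
--     for i in range(n - 2):
--         best = max(best, l[i + 2] - l[i])
--     return best
-- ===== Notes on version B (the rewrite author's own statement) =====
-- stated objective: simpler
-- what changed: Instead of materializing the zigzag arrangement and scanning its circular neighbors, B computes the answer directly on the sorted list as the maximum distance-2 gap max(l[i+2]-l[i]) seeded with l[1]-l[0], which provably equals A's circular maximum.
import Mathlib
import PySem

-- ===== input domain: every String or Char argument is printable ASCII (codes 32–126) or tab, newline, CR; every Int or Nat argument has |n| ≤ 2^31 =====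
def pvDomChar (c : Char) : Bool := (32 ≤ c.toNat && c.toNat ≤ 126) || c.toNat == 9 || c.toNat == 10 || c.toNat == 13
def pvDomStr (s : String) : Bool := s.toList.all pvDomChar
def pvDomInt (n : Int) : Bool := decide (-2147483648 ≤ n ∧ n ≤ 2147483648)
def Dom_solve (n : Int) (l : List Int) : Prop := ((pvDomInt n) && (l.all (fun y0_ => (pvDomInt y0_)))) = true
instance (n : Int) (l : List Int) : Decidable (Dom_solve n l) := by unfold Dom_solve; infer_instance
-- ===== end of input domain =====

-- B computes A's answer directly as the maximum distance-2 gap of the sorted list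
-- (simpler: no zigzag arrangement, no circular indexing). A sorts l in place; the
-- equivalence proved here is about the return value (B performs the same sort).


-- ===== PORT A =====
def solve (n : Int) (l : List Int) : Int :=
  let s := PySem.List.sorted l (fun x => x)
  let newl1 := (PySem.List.pyRange 0 n 2).foldl (fun acc i => acc ++ [PySem.List.pyGetD s i 0]) []
  let newl := ((PySem.List.pyRange 1 n 2).reverse).foldl (fun acc i => acc ++ [PySem.List.pyGetD s i 0]) newl1
  (PySem.List.pyRange 0 n 1).foldl
    (fun md i => max md |PySem.List.pyGetD newl i 0 - PySem.List.pyGetD newl (PySem.Int.mod (i + 1) n) 0|)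
    (-1)

-- ===== PORT B =====
def solve_alt (n : Int) (l : List Int) : Int :=
  let s := PySem.List.sorted l (fun x => x)
  if n ≤ 0 then -1
  else if n = 1 then 0
  else
    (PySem.List.pyRange 0 (n - 2) 1).foldl
      (fun best i => max best (PySem.List.pyGetD s (i + 2) 0 - PySem.List.pyGetD s i 0))
      (PySem.List.pyGetD s 1 0 - PySem.List.pyGetD s 0 0)

-- ===== PRECONDITION & SPEC =====
-- A indexes the sorted list at positions 0..n-1, so it raises IndexError unless n ≤ len(l).
def Pre_solve (n : Int) (l : List Int) : Prop := n ≤ (l.length : Int)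
instance (n : Int) (l : List Int) : Decidable (Pre_solve n l) := by unfold Pre_solve; infer_instance
def pvWitness_solve : Int × List Int := (4, [1, 5, 2, 10])

def Spec_solve (n : Int) (l : List Int) (out : Int) : Prop := out = solve_alt n l
instance (n : Int) (l : List Int) (out : Int) : Decidable (Spec_solve n l out) := by unfold Spec_solve; infer_instance

-- ===== CLAIM (what is proved, stated in full; the proofs are below) =====
def Claim_equal_solve : Prop := ∀ (n : Int) (l : List Int), Dom_solve n l → Pre_solve n l → Spec_solve n l (solve n l)

-- ===== LEMMAS AND PROOFS =====

theorem foldl_max_le {β : Type} (xs : List β) (f : β → Int) (init c : Int)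
    (h0 : init ≤ c) (h : ∀ x ∈ xs, f x ≤ c) :
    xs.foldl (fun a x => max a (f x)) init ≤ c := by
  induction xs generalizing init with
  | nil => exact h0
  | cons y ys ih =>
      exact ih (max init (f y)) (max_le h0 (h y (by simp))) (fun x hx => h x (by simp [hx]))

-- the zigzag arrangement A builds, expressed over Nat indices of the sorted list
def zig (s : List Int) (m : Nat) : List Int :=
  ((List.range ((m + 1) / 2)).map (fun k => s.getD (2 * k) 0)) ++
  ((List.range (m / 2)).map (fun k => s.getD (2 * k + 1) 0)).reverse

theorem zig_length (s : List Int) (m : Nat) : (zig s m).length = m := by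
  simp [zig]; omega

theorem zig_getD (s : List Int) (m i : Nat) (hi : i < m) :
    (zig s m).getD i 0 =
      if i < (m + 1) / 2 then s.getD (2 * i) 0 else s.getD (2 * (m - 1 - i) + 1) 0 := by
  have hlen : (zig s m).length = m := zig_length s m
  rw [List.getD_eq_getElem _ _ (by omega)]
  unfold zig
  by_cases h : i < (m + 1) / 2
  · rw [List.getElem_append_left (by simpa using h)]
    simp [h]
  · rw [List.getElem_append_right (by simpa using h)]
    have h1 : i - ((List.range ((m+1)/2)).map (fun k => s.getD (2 * k) 0)).length
        < (((List.range (m / 2)).map (fun k => s.getD (2 * k + 1) 0)).reverse).length := by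
      simp; omega
    rw [List.getElem_reverse]
    simp only [List.getElem_map, List.getElem_range, List.length_map, List.length_range] at *
    have : m / 2 - 1 - (i - (m + 1) / 2) = m - 1 - i := by omega
    simp [h, this]

-- core combinatorial fact: the circular max over the zigzag equals the max distance-2 gap
theorem core (s : List Int) (m : Nat) (hm : 2 ≤ m) (hlen : m ≤ s.length)
    (hmono : ∀ p q : Nat, p ≤ q → q < s.length → s.getD p 0 ≤ s.getD q 0) :
    (List.range m).foldl
      (fun md k => max md |(zig s m).getD k 0 - (zig s m).getD ((k + 1) % m) 0|) (-1)
    = (List.range (m - 2)).foldl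
        (fun b k => max b (s.getD (k + 2) 0 - s.getD k 0)) (s.getD 1 0 - s.getD 0 0) := by
  have habs : ∀ a b : Int, a ≤ b → |a - b| = b - a := by
    intro a b h; rw [abs_sub_comm]; exact abs_of_nonneg (by omega)
  have hgetk : ∀ i, i < m → (zig s m).getD i 0 =
      if i < (m + 1) / 2 then s.getD (2 * i) 0 else s.getD (2 * (m - 1 - i) + 1) 0 :=
    fun i hi => zig_getD s m i hi
  have hwrapval : |(zig s m).getD (m - 1) 0 - (zig s m).getD ((m - 1 + 1) % m) 0|
      = s.getD 1 0 - s.getD 0 0 := by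
    have h1 : (m - 1 + 1) % m = 0 := by
      have h0 : m - 1 + 1 = m := by omega
      simp [h0]
    rw [h1, hgetk (m - 1) (by omega), hgetk 0 (by omega)]
    rw [if_neg (by omega), if_pos (by omega)]
    have h2 : 2 * (m - 1 - (m - 1)) + 1 = 1 := by omega
    have h3 : 2 * 0 = 0 := by omega
    rw [h2, h3]
    exact abs_of_nonneg (by have := hmono 0 1 (by omega) (by omega); omega)
  have hevenval : ∀ k, k + 1 < (m + 1) / 2 →
      |(zig s m).getD k 0 - (zig s m).getD ((k + 1) % m) 0|
      = s.getD (2 * k + 2) 0 - s.getD (2 * k) 0 := by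
    intro k hk
    have hmod : (k + 1) % m = k + 1 := Nat.mod_eq_of_lt (by omega)
    rw [hmod, hgetk k (by omega), hgetk (k + 1) (by omega),
        if_pos (by omega), if_pos hk]
    have h2 : 2 * (k + 1) = 2 * k + 2 := by omega
    rw [h2]
    exact habs _ _ (hmono (2 * k) (2 * k + 2) (by omega) (by omega))
  have hjuncval : |(zig s m).getD ((m + 1) / 2 - 1) 0 - (zig s m).getD (((m + 1) / 2 - 1 + 1) % m) 0|
      = s.getD (m - 1) 0 - s.getD (m - 2) 0 := by
    have hmod : ((m + 1) / 2 - 1 + 1) % m = (m + 1) / 2 := by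
      have h1 : (m + 1) / 2 - 1 + 1 = (m + 1) / 2 := by omega
      rw [h1]; exact Nat.mod_eq_of_lt (by omega)
    rw [hmod, hgetk ((m + 1) / 2 - 1) (by omega), hgetk ((m + 1) / 2) (by omega),
        if_pos (by omega), if_neg (by omega)]
    rcases Nat.even_or_odd m with ⟨c, hc⟩ | ⟨c, hc⟩
    · have h1 : 2 * ((m + 1) / 2 - 1) = m - 2 := by omega
      have h2 : 2 * (m - 1 - (m + 1) / 2) + 1 = m - 1 := by omega
      rw [h1, h2]
      exact habs _ _ (hmono (m - 2) (m - 1) (by omega) (by omega))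
    · have h1 : 2 * ((m + 1) / 2 - 1) = m - 1 := by omega
      have h2 : 2 * (m - 1 - (m + 1) / 2) + 1 = m - 2 := by omega
      rw [h1, h2]
      exact abs_of_nonneg (by have := hmono (m - 2) (m - 1) (by omega) (by omega); omega)
  have hoddval : ∀ k, (m + 1) / 2 ≤ k → k + 1 < m →
      |(zig s m).getD k 0 - (zig s m).getD ((k + 1) % m) 0|
      = s.getD (2 * (m - 2 - k) + 3) 0 - s.getD (2 * (m - 2 - k) + 1) 0 := by
    intro k hk1 hk2
    have hmod : (k + 1) % m = k + 1 := Nat.mod_eq_of_lt (by omega)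
    rw [hmod, hgetk k (by omega), hgetk (k + 1) (by omega),
        if_neg (by omega), if_neg (by omega)]
    have h1 : 2 * (m - 1 - k) + 1 = 2 * (m - 2 - k) + 3 := by omega
    have h2 : m - 1 - (k + 1) = m - 2 - k := by omega
    rw [h1, h2]
    exact abs_of_nonneg
      (by have := hmono (2 * (m - 2 - k) + 1) (2 * (m - 2 - k) + 3) (by omega) (by omega); omega)
  have hB := PySem.List.le_foldl_max_int (List.range (m - 2))
      (fun k => s.getD (k + 2) 0 - s.getD k 0) (s.getD 1 0 - s.getD 0 0)
  have hA := PySem.List.le_foldl_max_int (List.range m)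
      (fun k => |(zig s m).getD k 0 - (zig s m).getD ((k + 1) % m) 0|) (-1)
  apply le_antisymm
  · apply foldl_max_le
    · exact le_trans (by have := hmono 0 1 (by omega) (by omega); omega) hB.1
    · intro k hk
      have hkm : k < m := List.mem_range.mp hk
      by_cases h1 : k + 1 < (m + 1) / 2
      · rw [hevenval k h1]
        have h2 : 2 * k < m - 2 := by omega
        have h3 := hB.2 (2 * k) (List.mem_range.mpr h2)
        simpa using h3
      · by_cases h2 : k + 1 = (m + 1) / 2
        · have hk' : k = (m + 1) / 2 - 1 := by omega
          rw [hk', hjuncval]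
          by_cases h3 : m = 2
          · subst h3
            exact hB.1
          · have h4 : m - 3 < m - 2 := by omega
            have h5 := hB.2 (m - 3) (List.mem_range.mpr h4)
            simp only at h5
            have h6 : m - 3 + 2 = m - 1 := by omega
            rw [h6] at h5
            refine le_trans ?_ h5
            have := hmono (m - 3) (m - 2) (by omega) (by omega)
            omega
        · by_cases h3 : k + 1 < m
          · have h4 : (m + 1) / 2 ≤ k := by omega
            rw [hoddval k h4 h3]
            have h5 : 2 * (m - 2 - k) + 1 < m - 2 := by omega
            have h6 := hB.2 (2 * (m - 2 - k) + 1) (List.mem_range.mpr h5)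
            simp only at h6
            have h7 : 2 * (m - 2 - k) + 1 + 2 = 2 * (m - 2 - k) + 3 := by omega
            rw [h7] at h6
            exact h6
          · have h4 : k = m - 1 := by omega
            rw [h4, hwrapval]
            exact hB.1
  · apply foldl_max_le
    · rw [← hwrapval]
      exact hA.2 (m - 1) (List.mem_range.mpr (by omega))
    · intro t ht
      have htm : t < m - 2 := List.mem_range.mp ht
      rcases Nat.even_or_odd t with ⟨c, hc⟩ | ⟨c, hc⟩
      · have h1 : c + 1 < (m + 1) / 2 := by omega
        have h2 := hA.2 c (List.mem_range.mpr (by omega))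
        simp only at h2
        rw [hevenval c h1] at h2
        have h3 : 2 * c = t := by omega
        rw [h3] at h2
        exact h2
      · have h1 : (m + 1) / 2 ≤ m - 2 - c := by omega
        have h2 : m - 2 - c + 1 < m := by omega
        have h3 := hA.2 (m - 2 - c) (List.mem_range.mpr (by omega))
        simp only at h3
        rw [hoddval (m - 2 - c) h1 h2] at h3
        have h4 : 2 * (m - 2 - (m - 2 - c)) + 1 = t := by omega
        have h5 : 2 * (m - 2 - (m - 2 - c)) + 3 = t + 2 := by omega
        rw [h4, h5] at h3
        exact h3

-- ===== VERDICT (by name: the statement is the Claim_ definition above) =====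
theorem solve_spec : Claim_equal_solve := by
  intro n l _ hpre
  unfold Pre_solve at hpre
  unfold Spec_solve
  simp only [solve, solve_alt]
  set s := PySem.List.sorted l (fun x => x) with hs
  have hslen : s.length = l.length := PySem.List.length_sorted l _ false
  by_cases hn0 : n ≤ 0
  · have r1 : PySem.List.pyRange 0 n 2 = [] := by
      rw [PySem.List.pyRange_of_pos _ _ (by norm_num : (0:Int) < 2), if_neg (by omega)]
      simp
    have r2 : PySem.List.pyRange 1 n 2 = [] := by
      rw [PySem.List.pyRange_of_pos _ _ (by norm_num : (0:Int) < 2), if_neg (by omega)]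
      simp
    have r3 : PySem.List.pyRange 0 n 1 = [] := PySem.List.pyRange_one_eq_nil (by omega)
    rw [r1, r2, r3]
    simp [hn0]
  · by_cases hn1 : n = 1
    · subst hn1
      have r1 : PySem.List.pyRange 0 1 2 = [0] := by decide
      have r2 : PySem.List.pyRange 1 1 2 = [] := by decide
      have r3 : PySem.List.pyRange 0 1 1 = [0] := by decide
      rw [r1, r2, r3]
      simp
    · -- main case: n ≥ 2
      have hm2 : 2 ≤ n.toNat := by omega
      have hmn : n = (n.toNat : Int) := by omega
      have hlenm : n.toNat ≤ s.length := by rw [hslen]; omega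
      have hmono : ∀ p q : Nat, p ≤ q → q < s.length → s.getD p 0 ≤ s.getD q 0 := by
        intro p q hpq hq
        rw [List.getD_eq_getElem _ _ (by omega), List.getD_eq_getElem _ _ hq]
        exact PySem.List.sorted_id_getElem_mono l hpq hq
      have hr1 : PySem.List.pyRange 0 n 2
          = (List.range ((n.toNat + 1) / 2)).map (fun k => ((2 * k : Nat) : Int)) := by
        rw [PySem.List.pyRange_of_pos _ _ (by norm_num : (0:Int) < 2), if_pos (by omega)]
        have hc : ((n - 0 + 2 - 1) / 2).toNat = (n.toNat + 1) / 2 := by omega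
        rw [hc]
        exact List.map_congr_left (fun a _ => by push_cast; ring)
      have hr2 : PySem.List.pyRange 1 n 2
          = (List.range (n.toNat / 2)).map (fun k => ((2 * k + 1 : Nat) : Int)) := by
        rw [PySem.List.pyRange_of_pos _ _ (by norm_num : (0:Int) < 2), if_pos (by omega)]
        have hc : ((n - 1 + 2 - 1) / 2).toNat = n.toNat / 2 := by omega
        rw [hc]
        exact List.map_congr_left (fun a _ => by push_cast; ring)
      have hr3 : PySem.List.pyRange 0 n 1 = (List.range n.toNat).map (fun k => ((k : Nat) : Int)) := by
        rw [PySem.List.pyRange_one]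
        have hc : (n - 0).toNat = n.toNat := by omega
        rw [hc]
        exact List.map_congr_left (fun a _ => by ring)
      have hr4 : PySem.List.pyRange 0 (n - 2) 1
          = (List.range (n.toNat - 2)).map (fun k => ((k : Nat) : Int)) := by
        rw [PySem.List.pyRange_one]
        have hc : (n - 2 - 0).toNat = n.toNat - 2 := by omega
        rw [hc]
        exact List.map_congr_left (fun a _ => by ring)
      rw [hr1, hr2, hr3, hr4,
          PySem.List.foldl_append_singleton_eq_map, PySem.List.foldl_append_singleton_eq_map,
          List.nil_append, List.map_reverse, List.map_map, List.map_map]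
      have hE : (List.range ((n.toNat + 1) / 2)).map ((fun i => PySem.List.pyGetD s i 0) ∘ (fun k => ((2 * k : Nat) : Int)))
          = (List.range ((n.toNat + 1) / 2)).map (fun k => s.getD (2 * k) 0) :=
        List.map_congr_left (fun a _ => by
          show PySem.List.pyGetD s (((2 * a : Nat)) : Int) 0 = s.getD (2 * a) 0
          exact PySem.List.pyGetD_natCast s (2 * a) 0)
      have hO : (List.range (n.toNat / 2)).map ((fun i => PySem.List.pyGetD s i 0) ∘ (fun k => ((2 * k + 1 : Nat) : Int)))
          = (List.range (n.toNat / 2)).map (fun k => s.getD (2 * k + 1) 0) :=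
        List.map_congr_left (fun a _ => by
          show PySem.List.pyGetD s (((2 * a + 1 : Nat)) : Int) 0 = s.getD (2 * a + 1) 0
          exact PySem.List.pyGetD_natCast s (2 * a + 1) 0)
      rw [hE, hO]
      have hz : ((List.range ((n.toNat + 1) / 2)).map (fun k => s.getD (2 * k) 0))
          ++ ((List.range (n.toNat / 2)).map (fun k => s.getD (2 * k + 1) 0)).reverse = zig s n.toNat := rfl
      rw [hz, List.foldl_map, List.foldl_map]
      have hcongrA : (List.range n.toNat).foldl
            (fun x y => max x |PySem.List.pyGetD (zig s n.toNat) ((y : Nat) : Int) 0 -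
              PySem.List.pyGetD (zig s n.toNat) (PySem.Int.mod (((y : Nat) : Int) + 1) n) 0|) (-1)
          = (List.range n.toNat).foldl
            (fun md k => max md |(zig s n.toNat).getD k 0 - (zig s n.toNat).getD ((k + 1) % n.toNat) 0|) (-1) := by
        apply PySem.List.foldl_congr_mem
        intro acc k hk
        have hkm : k < n.toNat := List.mem_range.mp hk
        have hmod : PySem.Int.mod (((k : Nat) : Int) + 1) n = (((k + 1) % n.toNat : Nat) : Int) := by
          rw [PySem.Int.mod_eq_emod_of_pos (by omega)]
          conv_lhs => rw [hmn]
          push_cast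
          ring
        rw [hmod, PySem.List.pyGetD_natCast, PySem.List.pyGetD_natCast]
      have hcongrB : (List.range (n.toNat - 2)).foldl
            (fun x y => max x (PySem.List.pyGetD s (((y : Nat) : Int) + 2) 0 - PySem.List.pyGetD s ((y : Nat) : Int) 0))
            (PySem.List.pyGetD s 1 0 - PySem.List.pyGetD s 0 0)
          = (List.range (n.toNat - 2)).foldl
            (fun b k => max b (s.getD (k + 2) 0 - s.getD k 0)) (s.getD 1 0 - s.getD 0 0) := by
        have i1 : PySem.List.pyGetD s 1 0 = s.getD 1 0 := by
          rw [show (1 : Int) = ((1 : Nat) : Int) from rfl, PySem.List.pyGetD_natCast]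
        have i0 : PySem.List.pyGetD s 0 0 = s.getD 0 0 := by
          rw [show (0 : Int) = ((0 : Nat) : Int) from rfl, PySem.List.pyGetD_natCast]
        rw [i1, i0]
        apply PySem.List.foldl_congr_mem
        intro acc k hk
        have hcast : ((k : Nat) : Int) + 2 = (((k + 2 : Nat)) : Int) := by push_cast; ring
        rw [hcast, PySem.List.pyGetD_natCast, PySem.List.pyGetD_natCast]
      rw [hcongrA, if_neg hn0, if_neg hn1, hcongrB]
      exact core s n.toNat hm2 hlenm hmono
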